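-- pv_equiv track=rewrite | github.com/IanMadd/md-codeblocks | md_codeblock_converter.py | unindent_code
-- ===== SOURCE A (Python) =====
-- def unindent_code(code_content: str) -> str:
--     """
--     Remove the indentation from code content.
--
--     Args:
--         code_content (str): The indented code content
--
--     Returns:
--         str: The unindented code content
--     """
--     lines = code_content.split('\n')
--     unindented_lines = []
--
--     for line in lines:
--         # Remove 4 spaces or 1 tab from the beginning
--         if line.startswith('    '):
--             unindented_lines.append(line[4:])
--         elif line.startswith('\t'):
--             unindented_lines.append(line[1:])
--         else:
--             # For lines that might be empty or have less indentation
--             unindented_lines.append(line)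
--
--     return '\n'.join(unindented_lines)
-- ===== SOURCE B (Python) =====
-- def _strip_one(s, i):
--     # one indent unit at position i: 4 spaces preferred, else a single tab
--     if s.startswith('    ', i):
--         return i + 4
--     if s.startswith('\t', i):
--         return i + 1
--     return i
--
--
-- def unindent_code(code_content: str) -> str:
--     """
--     Remove the indentation from code content.
--
--     Single pass over the characters: skip one indent unit at the start of
--     the string and after every newline, copying everything else verbatim.
--     No line list is built and nothing is re-joined.
--     """
--     s = code_content
--     n = len(s)
--     out = []
--     i = _strip_one(s, 0)
--     while i < n:
--         c = s[i]
--         out.append(c)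
--         i += 1
--         if c == '\n':
--             i = _strip_one(s, i)
--     return ''.join(out)
-- ===== Notes on version B (the rewrite author's own statement) =====
-- stated objective: alternative
-- what changed: Replaced A's split-into-lines / per-line branch / join pipeline with a single character-level pass that skips one indent unit (4 spaces, else one tab) at the start of the string and right after each newline, copying all other characters verbatim.
import Mathlib
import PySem

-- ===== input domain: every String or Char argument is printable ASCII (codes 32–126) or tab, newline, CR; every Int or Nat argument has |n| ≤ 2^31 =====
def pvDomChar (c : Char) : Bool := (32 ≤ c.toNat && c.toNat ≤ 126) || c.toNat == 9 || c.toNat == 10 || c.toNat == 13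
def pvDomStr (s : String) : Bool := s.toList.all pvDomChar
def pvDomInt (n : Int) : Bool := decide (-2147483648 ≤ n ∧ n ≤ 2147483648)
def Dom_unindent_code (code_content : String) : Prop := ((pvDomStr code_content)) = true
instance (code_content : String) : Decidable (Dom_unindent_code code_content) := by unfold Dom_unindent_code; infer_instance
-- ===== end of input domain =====

-- B replaces A's split/per-line-branch/join pipeline by a single character-level pass that
-- skips one indent unit at the start and after each newline (objective: alternative, same cost).

-- ===== PORT A =====
def unindent_code (code_content : String) : String :=
  let lines := PySem.Chars.splitOn code_content.toList "\n".toList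
  let unindented_lines := lines.foldl (fun acc line =>
    if PySem.Chars.startswith line "    ".toList then
      acc ++ [PySem.Chars.slice line (some 4) none]
    else if PySem.Chars.startswith line "\t".toList then
      acc ++ [PySem.Chars.slice line (some 1) none]
    else
      acc ++ [line]) []
  String.mk (PySem.Chars.join "\n".toList unindented_lines)

-- ===== PORT B =====
-- _strip_one: index after one indent unit at position i; here: the rest of the string after it
def pvStripOne (cs : List Char) : List Char :=
  if PySem.Chars.startswith cs "    ".toList then cs.drop 4
  else if PySem.Chars.startswith cs "\t".toList then cs.drop 1
  else cs

theorem pvStripOne_length_le (cs : List Char) : (pvStripOne cs).length ≤ cs.length := by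
  unfold pvStripOne; split_ifs <;> simp [List.length_drop]

-- the while loop: copy each character; after a newline, strip one indent unit
def pvAltGo : List Char → List Char
  | [] => []
  | c :: rest =>
      if c = '\n' then '\n' :: pvAltGo (pvStripOne rest) else c :: pvAltGo rest
termination_by cs => cs.length
decreasing_by
  · exact Nat.lt_succ_of_le (pvStripOne_length_le rest)
  · simp

def unindent_code_alt (code_content : String) : String :=
  String.mk (pvAltGo (pvStripOne code_content.toList))

-- ===== PRECONDITION & SPEC =====
def Spec_unindent_code (code_content : String) (out : String) : Prop := out = unindent_code_alt code_content
instance (code_content : String) (out : String) : Decidable (Spec_unindent_code code_content out) := by unfold Spec_unindent_code; infer_instance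

-- ===== CLAIM (what is proved, stated in full; the proofs are below) =====
def Claim_equal_unindent_code : Prop := ∀ (code_content : String), Dom_unindent_code code_content → Spec_unindent_code code_content (unindent_code code_content)

-- ===== LEMMAS AND PROOFS =====

-- reference splitter: what splitOn computes for the single-character separator '\n'
def pvSp : List Char → List (List Char)
  | [] => [[]]
  | c :: rest =>
      if c = '\n' then [] :: pvSp rest
      else
        match pvSp rest with
        | [] => [[c]]
        | p :: ps => (c :: p) :: ps

theorem pvSp_ne_nil (cs : List Char) : pvSp cs ≠ [] := by
  cases cs with
  | nil => simp [pvSp]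
  | cons c rest =>
    simp only [pvSp]
    split_ifs
    · simp
    · cases h : pvSp rest <;> simp

theorem pvGo_eq (fuel : Nat) (l cur : List Char) (acc : List (List Char)) (h : l.length < fuel) :
    PySem.Chars.splitOn.go ['\n'] fuel l cur acc
      = acc.reverse ++ (pvSp l).modifyHead (cur.reverse ++ ·) := by
  induction fuel generalizing l cur acc with
  | zero => omega
  | succ fuel ih =>
    cases l with
    | nil =>
      simp [PySem.Chars.splitOn.go, pvSp]
    | cons c rest =>
      by_cases hc : c = '\n'
      · subst hc
        have hp : List.isPrefixOf ['\n'] ('\n' :: rest) = true := by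
          simp [List.isPrefixOf]
        rw [PySem.Chars.splitOn.go]
        simp only [hp, if_pos]
        have : List.drop (['\n'] : List Char).length ('\n' :: rest) = rest := by simp
        rw [this, ih rest [] (cur.reverse :: acc) (by simpa using Nat.lt_of_succ_lt_succ h)]
        have hne := pvSp_ne_nil rest
        cases hsp : pvSp rest with
        | nil => exact absurd hsp hne
        | cons p ps => simp [pvSp, hsp]
      · have hp : List.isPrefixOf ['\n'] (c :: rest) = false := by
          simp [List.isPrefixOf]; intro h'; exact hc h'.symm
        rw [PySem.Chars.splitOn.go]
        simp only [hp, if_neg, Bool.false_eq_true, not_false_eq_true]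
        rw [ih rest (c :: cur) acc (by simpa using Nat.lt_of_succ_lt_succ h)]
        have hne := pvSp_ne_nil rest
        cases hsp : pvSp rest with
        | nil => exact absurd hsp hne
        | cons p ps => simp [pvSp, hsp, hc]

theorem splitOn_eq_pvSp (cs : List Char) :
    PySem.Chars.splitOn cs ['\n'] = pvSp cs := by
  have h := pvGo_eq (cs.length + 1) cs [] [] (by omega)
  rw [show (List.modifyHead (fun x => ([] : List Char).reverse ++ x) (pvSp cs)) = pvSp cs from by
        cases pvSp cs <;> simp] at h
  simpa [PySem.Chars.splitOn] using h

-- decomposition of a string at its first newline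
theorem pvDecomp (cs : List Char) :
    '\n' ∉ cs ∨ ∃ p r, cs = p ++ '\n' :: r ∧ '\n' ∉ p := by
  induction cs with
  | nil => left; simp
  | cons c rest ih =>
    by_cases hc : c = '\n'
    · right; exact ⟨[], rest, by simp [hc], by simp⟩
    · rcases ih with h | ⟨p, r, hr, hp⟩
      · left; simp [h]; exact fun hh => hc hh.symm
      · right
        exact ⟨c :: p, r, by simp [hr], by simp [hp]; exact fun hh => hc hh.symm⟩

theorem pvSp_no_newline (cs : List Char) (h : '\n' ∉ cs) : pvSp cs = [cs] := by
  induction cs with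
  | nil => simp [pvSp]
  | cons c rest ih =>
    have hc : c ≠ '\n' := fun hc => h (by simp [hc])
    have hr : '\n' ∉ rest := fun hr => h (by simp [hr])
    simp [pvSp, hc, ih hr]

theorem pvSp_append (p r : List Char) (h : '\n' ∉ p) :
    pvSp (p ++ '\n' :: r) = p :: pvSp r := by
  induction p with
  | nil => simp [pvSp]
  | cons c t ih =>
    have hc : c ≠ '\n' := fun hc => h (by simp [hc])
    have ht : '\n' ∉ t := fun hr => h (by simp [hr])
    simp [pvSp, hc, ih ht]

-- A's per-line mapping
def pvF (line : List Char) : List Char :=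
  if PySem.Chars.startswith line "    ".toList then PySem.Chars.slice line (some 4) none
  else if PySem.Chars.startswith line "\t".toList then PySem.Chars.slice line (some 1) none
  else line

theorem pvF_eq_stripOne (l : List Char) : pvF l = pvStripOne l := by
  unfold pvF pvStripOne
  have h4 : PySem.Chars.slice l (some 4) none = l.drop 4 := by
    have := PySem.List.slice_from_natCast l 4
    simpa using this
  have h1 : PySem.Chars.slice l (some 1) none = l.drop 1 := by
    have := PySem.List.slice_from_natCast l 1
    simpa using this
  rw [h4, h1]

-- pvStripOne drops the same prefix from p ++ suffix as from p, when suffix is empty or starts with '\n'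
theorem pvStripOne_append (p suffix : List Char) (hnl : '\n' ∉ p)
    (hs : suffix = [] ∨ ∃ r, suffix = '\n' :: r) :
    pvStripOne (p ++ suffix) = pvStripOne p ++ suffix := by
  rcases p with _ | ⟨a, _ | ⟨b, _ | ⟨c, _ | ⟨d, t⟩⟩⟩⟩ <;>
    rcases hs with h | ⟨r, h⟩ <;> subst h <;>
    simp_all [pvStripOne, PySem.Chars.startswith, List.isPrefixOf] <;>
    split_ifs <;> simp_all

theorem pvAltGo_no_newline (p : List Char) (h : '\n' ∉ p) : ∀ s, pvAltGo (p ++ s) = p ++ pvAltGo s := by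
  induction p with
  | nil => intro s; simp
  | cons c t ih =>
    intro s
    have hc : c ≠ '\n' := fun hc => h (by simp [hc])
    have ht : '\n' ∉ t := fun hr => h (by simp [hr])
    simp [pvAltGo, hc, ih ht]

theorem pvStripOne_no_newline (p : List Char) (h : '\n' ∉ p) : '\n' ∉ pvStripOne p := by
  unfold pvStripOne
  split_ifs <;> intro hmem <;> exact h (by first | exact List.mem_of_mem_drop hmem | exact hmem)

theorem pvMain (cs : List Char) :
    pvAltGo (pvStripOne cs) = PySem.Chars.join "\n".toList ((pvSp cs).map pvF) := by
  induction hn : cs.length using Nat.strong_induction_on generalizing cs with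
  | _ n ih =>
  rcases pvDecomp cs with h | ⟨p, r, hr, hp⟩
  · rw [pvSp_no_newline cs h]
    have h' := pvStripOne_no_newline cs h
    have h2 := pvAltGo_no_newline (pvStripOne cs) h' []
    rw [show pvAltGo ([] : List Char) = [] from by simp [pvAltGo], List.append_nil] at h2
    simp [h2, PySem.Chars.join, pvF_eq_stripOne, List.intercalate]
  · subst hr
    rw [pvSp_append p r hp]
    have hstrip := pvStripOne_append p ('\n' :: r) hp (Or.inr ⟨r, rfl⟩)
    rw [hstrip, pvAltGo_no_newline (pvStripOne p) (pvStripOne_no_newline p hp)]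
    have hrec : pvAltGo ('\n' :: r) = '\n' :: pvAltGo (pvStripOne r) := by
      simp [pvAltGo]
    rw [hrec, ih r.length (by subst hn; simp; omega) r rfl]
    have hne := pvSp_ne_nil r
    cases hsp : pvSp r with
    | nil => exact absurd hsp hne
    | cons q qs =>
      simp [PySem.Chars.join, List.intercalate, pvF_eq_stripOne]

-- ===== VERDICT (by name: the statement is the Claim_ definition above) =====
theorem unindent_code_spec : Claim_equal_unindent_code := by
  intro s _
  unfold Spec_unindent_code unindent_code unindent_code_alt
  have hfold : ∀ (lines : List (List Char)),
      lines.foldl (fun acc line =>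
        if PySem.Chars.startswith line "    ".toList then acc ++ [PySem.Chars.slice line (some 4) none]
        else if PySem.Chars.startswith line "\t".toList then acc ++ [PySem.Chars.slice line (some 1) none]
        else acc ++ [line]) [] = lines.map pvF := by
    intro lines
    rw [show (fun acc line =>
        if PySem.Chars.startswith line "    ".toList then acc ++ [PySem.Chars.slice line (some 4) none]
        else if PySem.Chars.startswith line "\t".toList then acc ++ [PySem.Chars.slice line (some 1) none]
        else acc ++ [line]) = (fun (acc : List (List Char)) line => acc ++ [pvF line]) by
      funext acc line; unfold pvF; split_ifs <;> rfl]
    exact PySem.List.foldl_append_singleton_eq_map pvF lines []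
  simp only [hfold]
  rw [show PySem.Chars.splitOn s.toList "\n".toList = pvSp s.toList from splitOn_eq_pvSp s.toList]
  rw [← pvMain s.toList]
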